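-- pv_equiv track=rewrite | github.com/liuzhonghe060718/Introduction-to-computation-B | 未分类杂题4/取石子游戏.py | check
-- ===== SOURCE A (Python) =====
-- def check(a,b):
--     if b >= 2 * a:
--         return True
--     else:
--         b-=a
--         if check(b,a):
--             return False
--         else:
--             return True
-- ===== SOURCE B (Python) =====
-- def check(a, b):
--     k = 0
--     while b < 2 * a:
--         a, b = b - a, a
--         k += 1
--     return k % 2 == 0
-- ===== Notes on version B (the rewrite author's own statement) =====
-- stated objective: simpler
-- what changed: Replaced the recursive win/lose negation chain with an iterative loop that repeatedly maps (a,b) to (b-a,a), counts the steps, and returns whether the count is even.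
import Mathlib
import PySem

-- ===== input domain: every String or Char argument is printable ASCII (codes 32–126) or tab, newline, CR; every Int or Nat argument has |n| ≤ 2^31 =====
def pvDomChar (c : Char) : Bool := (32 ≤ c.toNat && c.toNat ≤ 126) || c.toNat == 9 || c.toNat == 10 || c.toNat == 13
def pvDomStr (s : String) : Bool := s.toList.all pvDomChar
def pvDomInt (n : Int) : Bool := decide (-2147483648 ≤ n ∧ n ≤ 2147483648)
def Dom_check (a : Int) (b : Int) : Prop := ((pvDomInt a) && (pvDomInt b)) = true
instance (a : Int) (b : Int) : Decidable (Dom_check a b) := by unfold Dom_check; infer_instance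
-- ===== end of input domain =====

-- B replaces A's chain of negated recursive calls by an iterative subtraction loop that
-- counts steps and returns the parity of the count (objective: simpler, no recursion).

-- ===== PORT A =====
-- literal transliteration of A's recursion; terminates because the measure below drops each call
def check (a : Int) (b : Int) : Bool :=
  if h : b ≥ 2 * a then true
  else if check (b - a) a then false else true
termination_by ((if b < 2 * a then 1 else 0) + a.toNat : Nat)
decreasing_by split_ifs <;> omega

-- ===== PORT B =====
-- loop of Source B: while b < 2*a: (a,b) = (b-a, a); k += 1
def loopK (a : Int) (b : Int) (k : Nat) : Nat :=
  if h : b < 2 * a then loopK (b - a) a (k + 1) else k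
termination_by ((if b < 2 * a then 1 else 0) + a.toNat : Nat)
decreasing_by split_ifs <;> omega

def check_alt (a : Int) (b : Int) : Bool :=
  decide (loopK a b 0 % 2 = 0)

-- ===== PRECONDITION & SPEC =====
def Spec_check (a : Int) (b : Int) (out : Bool) : Prop := out = check_alt a b
instance (a : Int) (b : Int) (out : Bool) : Decidable (Spec_check a b out) := by unfold Spec_check; infer_instance

-- ===== CLAIM (what is proved, stated in full; the proofs are below) =====
def Claim_equal_check : Prop := ∀ (a : Int) (b : Int), Dom_check a b → Spec_check a b (check a b)

-- ===== LEMMAS AND PROOFS =====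
theorem loopK_succ (a : Int) (b : Int) (k : Nat) : loopK a b (k + 1) = loopK a b k + 1 := by
  induction a, b, k using loopK.induct with
  | case1 a b k h ih =>
      conv_lhs => rw [loopK]
      conv_rhs => rw [loopK]
      rw [dif_pos h, dif_pos h]
      exact ih
  | case2 a b k h =>
      conv_lhs => rw [loopK]
      conv_rhs => rw [loopK]
      rw [dif_neg h, dif_neg h]

theorem loopK_step (a : Int) (b : Int) (h : ¬ b ≥ 2 * a) :
    loopK a b 0 = loopK (b - a) a 0 + 1 := by
  conv_lhs => rw [loopK]
  rw [dif_pos (by omega : b < 2 * a)]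
  exact loopK_succ (b - a) a 0

theorem check_eq_parity (a : Int) (b : Int) :
    check a b = decide (loopK a b 0 % 2 = 0) := by
  induction a, b using check.induct with
  | case1 a b h =>
      conv_lhs => rw [check]
      rw [dif_pos h]
      conv_rhs => rw [loopK]
      rw [dif_neg (by omega : ¬ b < 2 * a)]
      simp
  | case2 a b h hc ih =>
      conv_lhs => rw [check]
      rw [dif_neg h, if_pos hc, loopK_step a b h]
      rw [hc] at ih
      have hs : loopK (b - a) a 0 % 2 = 0 := by simpa using ih.symm
      simp [Nat.add_mod, hs]
  | case3 a b h hc ih =>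
      conv_lhs => rw [check]
      rw [dif_neg h, if_neg hc, loopK_step a b h]
      have hcf : check (b - a) a = false := by simpa using hc
      rw [hcf] at ih
      have hs : loopK (b - a) a 0 % 2 = 1 := by
        rcases Nat.mod_two_eq_zero_or_one (loopK (b - a) a 0) with h2 | h2
        · simp [h2] at ih
        · exact h2
      simp [Nat.add_mod, hs]

-- ===== VERDICT (by name: the statement is the Claim_ definition above) =====
theorem check_spec : Claim_equal_check := by
  intro a b _
  unfold Spec_check check_alt
  exact check_eq_parity a b
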